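/- GENERATED by c/gen_decode.py: decode facts of the image, one per distinct instruction byte string. -/
import UserX.DecodeImage

#decode_all ProgX.Base.Dec
  "0f9ec0"  -- setle al
  "44887500"  -- mov BYTE PTR [rbp+0x0],r14b
  "4883e0f8"  -- and rax,0xfffffffffffffff8
  "4889da"  -- mov rdx,rbx
  "488d4707"  -- lea rax,[rdi+0x7]
  "4989d1"  -- mov r9,rdx
  "4c89e3"  -- mov rbx,r12
  "660f2ee4"  -- ucomisd xmm4,xmm4
  "730a"  -- jae 104124
  "7531"  -- jne 104257
  "7e54"  -- jle 1022a4
  "b800000000"  -- mov eax,0x0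
  "e80af8ffff"  -- call 100059
  "e8a0f8ffff"  -- call 1025c0
  "e8f3bdffff"  -- call 100059
  "ebee"  -- jmp 102752
  "f20f58059fd70300"  -- addsd xmm0,QWORD PTR [rip+0x3d79f]
  "f20f59c2"  -- mulsd xmm0,xmm2
  "f20f5e15fcdf0300"  -- divsd xmm2,QWORD PTR [rip+0x3dffc]
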